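-- pv_equiv track=rewrite | github.com/XVX-016/biosynth-monorepo | backend/chem/retrosynthesis/planner.py | _molecule_signature
-- ===== SOURCE A (Python) =====
-- from typing import Dict, List, Any, Optional, Tuple
--
-- def _molecule_signature(molecule: Dict[str, Any]) -> str:
--     """Create a simple signature for molecule (for visited tracking)"""
--     atoms = molecule.get("atoms", [])
--     bonds = molecule.get("bonds", [])
--
--     # Simple signature: element counts
--     element_counts = {}
--     for atom in atoms:
--         elem = atom.get("element", "?")
--         element_counts[elem] = element_counts.get(elem, 0) + 1
--
--     sig = "_".join(f"{k}{v}" for k, v in sorted(element_counts.items()))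
--     return sig
-- ===== SOURCE B (Python) =====
-- def _group_counts(elems):
--     """Run-length encode an already-sorted list as (value, count) pairs."""
--     if not elems:
--         return []
--     out = []
--     cur, n = elems[0], 1
--     for e in elems[1:]:
--         if e == cur:
--             n += 1
--         else:
--             out.append((cur, n))
--             cur, n = e, 1
--     out.append((cur, n))
--     return out
--
--
-- def _molecule_signature(molecule):
--     """Create a simple signature for molecule (for visited tracking)"""
--     elems = sorted(atom.get("element", "?") for atom in molecule.get("atoms", []))
--     return "_".join(f"{e}{n}" for e, n in _group_counts(elems))
-- ===== Notes on version B (the rewrite author's own statement) =====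
-- stated objective: alternative
-- what changed: Replaces A's element-counting dict plus sorted(items) with sorting the flat element list once and run-length encoding the sorted runs in a single scan.
import Mathlib
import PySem

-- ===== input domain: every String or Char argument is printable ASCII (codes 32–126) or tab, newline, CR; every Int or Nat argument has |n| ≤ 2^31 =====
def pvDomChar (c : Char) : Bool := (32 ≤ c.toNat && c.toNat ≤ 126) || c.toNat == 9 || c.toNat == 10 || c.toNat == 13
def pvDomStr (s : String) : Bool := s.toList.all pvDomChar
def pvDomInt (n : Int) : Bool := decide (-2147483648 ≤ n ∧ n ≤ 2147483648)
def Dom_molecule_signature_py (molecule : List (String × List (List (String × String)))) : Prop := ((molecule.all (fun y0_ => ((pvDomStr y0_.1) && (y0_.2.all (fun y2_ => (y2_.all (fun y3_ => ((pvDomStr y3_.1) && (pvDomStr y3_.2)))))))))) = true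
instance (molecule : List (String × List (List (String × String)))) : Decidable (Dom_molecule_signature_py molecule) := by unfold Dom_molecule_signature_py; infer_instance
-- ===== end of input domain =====

-- B replaces A's counting dict + sorted(items) with sort-all-elements then one run-length scan (alternative algorithm, similar cost).

-- ===== PORT A =====
def molecule_signature_py (molecule : List (String × List (List (String × String)))) : String :=
  let atoms := PySem.Dict.getD (PySem.Dict.mk molecule) "atoms" []
  let _bonds := PySem.Dict.getD (PySem.Dict.mk molecule) "bonds" []
  let element_counts : PySem.Dict String Int :=
    atoms.foldl (fun d atom =>
      let elem := PySem.Dict.getD (PySem.Dict.mk atom) "element" "?"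
      d.insert elem (d.getD elem 0 + 1)) PySem.Dict.empty
  -- sorted(element_counts.items()): tuple key, ported with sorted2 per PySem convention
  PySem.Str.join "_"
    ((PySem.List.sorted2 element_counts.items Prod.fst Prod.snd).map
      (fun kv => kv.1 ++ PySem.Int.toStr kv.2))

-- ===== PORT B =====
-- run-length encoding of an already-sorted list (Python helper _group_counts)
def pvGroupCounts (elems : List String) : List (String × Int) :=
  match elems with
  | [] => []
  | x :: rest =>
    let s := rest.foldl (fun s e =>
      if e == s.2.1 then (s.1, s.2.1, s.2.2 + 1)
      else (s.1 ++ [(s.2.1, s.2.2)], e, 1)) (([] : List (String × Int)), x, (1 : Int))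
    s.1 ++ [(s.2.1, s.2.2)]

def molecule_signature_py_alt (molecule : List (String × List (List (String × String)))) : String :=
  let elems := PySem.List.sorted
    ((PySem.Dict.getD (PySem.Dict.mk molecule) "atoms" []).map
      (fun atom => PySem.Dict.getD (PySem.Dict.mk atom) "element" "?"))
    (fun x => x)
  PySem.Str.join "_" ((pvGroupCounts elems).map (fun en => en.1 ++ PySem.Int.toStr en.2))

-- ===== PRECONDITION & SPEC =====
def Spec_molecule_signature_py (molecule : List (String × List (List (String × String)))) (out : String) : Prop := out = molecule_signature_py_alt molecule
instance (molecule : List (String × List (List (String × String)))) (out : String) : Decidable (Spec_molecule_signature_py molecule out) := by unfold Spec_molecule_signature_py; infer_instance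

-- ===== CLAIM (what is proved, stated in full; the proofs are below) =====
def Claim_equal_molecule_signature_py : Prop := ∀ (molecule : List (String × List (List (String × String)))), Dom_molecule_signature_py molecule → Spec_molecule_signature_py molecule (molecule_signature_py molecule)

-- ===== LEMMAS AND PROOFS =====

lemma insertBy_congr {α : Type} (b1 b2 : α → α → Bool) (x : α) (l : List α)
    (h : ∀ y ∈ l, b1 x y = b2 x y) :
    PySem.List.insertBy b1 x l = PySem.List.insertBy b2 x l := by
  induction l with
  | nil => rfl
  | cons y ys ih =>
    simp only [PySem.List.insertBy, h y (by simp)]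
    split
    · rfl
    · simpa using ih (fun z hz => h z (by simp [hz]))

lemma foldl_insertBy_congr {α : Type} (b1 b2 : α → α → Bool) (xs acc : List α)
    (h : ∀ x ∈ xs, ∀ y, (y ∈ acc ∨ y ∈ xs) → b1 x y = b2 x y) :
    xs.foldl (fun a x => PySem.List.insertBy b1 x a) acc
      = xs.foldl (fun a x => PySem.List.insertBy b2 x a) acc := by
  induction xs generalizing acc with
  | nil => rfl
  | cons x xs ih =>
    simp only [List.foldl_cons]
    rw [insertBy_congr b1 b2 x acc (fun y hy => h x (by simp) y (Or.inl hy))]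
    exact ih (PySem.List.insertBy b2 x acc) (fun z hz y hy => by
      refine h z (by simp [hz]) y ?_
      rcases hy with hy | hy
      · rcases (PySem.List.mem_insertBy b2 x y acc).mp hy with h' | h'
        · exact Or.inr (by simp [h'])
        · exact Or.inl h'
      · exact Or.inr (by simp [hy]))

lemma sorted2_eq_sorted_fst {α κ₁ κ₂ : Type} [LinearOrder κ₁] [LinearOrder κ₂]
    (xs : List α) (k1 : α → κ₁) (k2 : α → κ₂)
    (hinj : ∀ a ∈ xs, ∀ b ∈ xs, k1 a = k1 b → a = b) :
    PySem.List.sorted2 xs k1 k2 = PySem.List.sorted xs k1 := by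
  simp only [PySem.List.sorted2, PySem.List.sorted, if_neg (by decide : ¬ (false = true))]
  apply foldl_insertBy_congr
  intro a ha y hy
  have hy' : y ∈ xs := hy.resolve_left (by simp)
  rcases lt_trichotomy (k1 a) (k1 y) with h | h | h
  · simp [h]
  · have : a = y := hinj a ha y hy' h
    subst this
    simp
  · simp [h, not_lt_of_gt h]

lemma foldl_add_acc {α : Type} [BEq α] [LawfulBEq α] (l acc : List α) :
    l.foldl PySem.Set.add acc
      = acc ++ (PySem.Set.ofList l).filter (fun z => !(acc.contains z)) := by
  induction l generalizing acc with
  | nil => simp [PySem.Set.ofList, PySem.Set.empty]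
  | cons x l ih =>
    have hofl : PySem.Set.ofList (x :: l) = List.foldl PySem.Set.add (PySem.Set.add PySem.Set.empty x) l := rfl
    have hex : PySem.Set.add PySem.Set.empty x = [x] := by
      simp [PySem.Set.add, PySem.Set.empty, PySem.Set.contains]
    simp only [List.foldl_cons]
    rw [ih (PySem.Set.add acc x), hofl, ih (PySem.Set.add PySem.Set.empty x), hex]
    by_cases hx : x ∈ acc
    · rw [PySem.Set.add_of_mem hx]
      simp only [List.filter_append, List.filter_filter]
      congr 1
      have h0 : List.filter (fun z => !acc.contains z) [x] = [] := by simp [hx]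
      rw [h0, List.nil_append]
      exact List.filter_congr (fun z hz => by
        by_cases hzx : z = x
        · subst hzx; simp [hx]
        · simp [hzx])
    · rw [PySem.Set.add_of_not_mem hx]
      simp only [List.filter_append, List.filter_filter, List.append_assoc]
      congr 1
      have h1 : List.filter (fun z => !acc.contains z) [x] = [x] := by simp [hx]
      simp only [h1]
      congr 1
      exact List.filter_congr (fun z hz => by
        by_cases h1 : z ∈ acc <;> by_cases h2 : z = x <;>
          simp [h1, h2, List.mem_append])


lemma ofList_cons {α : Type} [BEq α] [LawfulBEq α] (y : α) (ys : List α) :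
    PySem.Set.ofList (y :: ys) = y :: (PySem.Set.ofList ys).filter (fun z => !(z == y)) := by
  have h : PySem.Set.ofList (y :: ys) = List.foldl PySem.Set.add [y] ys := by
    simp [PySem.Set.ofList, PySem.Set.add, PySem.Set.empty, PySem.Set.contains]
  rw [h, foldl_add_acc]
  simp only [List.cons_append, List.nil_append, List.cons.injEq, true_and]
  exact List.filter_congr (fun z hz => by simp [List.contains_eq_mem, eq_comm])

lemma ofList_sublist {α : Type} [BEq α] [LawfulBEq α] (l : List α) :
    (PySem.Set.ofList l).Sublist l := by
  induction l with
  | nil => simp [PySem.Set.ofList, PySem.Set.empty]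
  | cons x l ih =>
    rw [ofList_cons]
    exact (List.Sublist.cons₂ x ((List.filter_sublist.trans ih)))


lemma groupLoop_spec (rest : List String) (out : List (String × Int)) (cur : String) (n : Int)
    (hs : rest.Pairwise (· ≤ ·)) (hc : ∀ y ∈ rest, cur ≤ y) :
    (rest.foldl (fun s e =>
        if e == s.2.1 then (s.1, s.2.1, s.2.2 + 1)
        else (s.1 ++ [(s.2.1, s.2.2)], e, 1)) (out, cur, n)).1
      ++ [((rest.foldl (fun s e =>
        if e == s.2.1 then (s.1, s.2.1, s.2.2 + 1)
        else (s.1 ++ [(s.2.1, s.2.2)], e, 1)) (out, cur, n)).2.1,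
           (rest.foldl (fun s e =>
        if e == s.2.1 then (s.1, s.2.1, s.2.2 + 1)
        else (s.1 ++ [(s.2.1, s.2.2)], e, 1)) (out, cur, n)).2.2)]
    = out ++ (cur, n + (rest.count cur : Int))
        :: ((PySem.Set.ofList rest).filter (fun z => !(z == cur))).map
            (fun k => (k, (rest.count k : Int))) := by
  induction rest generalizing out cur n with
  | nil => simp [PySem.Set.ofList, PySem.Set.empty]
  | cons y ys ih =>
    simp only [List.foldl_cons]
    by_cases hyc : y = cur
    · subst hyc
      rw [if_pos (by simp)]
      rw [ih out y (n + 1) hs.tail (fun z hz => List.rel_of_pairwise_cons hs hz)]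
      rw [ofList_cons]
      simp only [List.filter_cons, beq_self_eq_true, Bool.not_true, List.filter_filter,
        Bool.and_self, List.count_cons_self]
      congr 2
      · congr 1; push_cast; ring
      refine List.map_congr_left (fun k hk => ?_)
      have hk' : ¬ k = y := by
        rcases List.mem_filter.mp hk with ⟨_, h2⟩
        simpa using h2
      rw [List.count_cons]
      have : ¬ y = k := fun h => hk' h.symm
      simp [this]
    · have hcy : cur < y := lt_of_le_of_ne (hc y (by simp)) (fun h => hyc h.symm)
      rw [if_neg (by simpa using hyc)]
      rw [ih (out ++ [(cur, n)]) y 1 hs.tail (fun z hz => List.rel_of_pairwise_cons hs hz)]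
      have hall : ∀ z ∈ ys, y ≤ z := fun z hz => List.rel_of_pairwise_cons hs hz
      have hcount0 : (y :: ys).count cur = 0 := by
        rw [List.count_eq_zero]
        intro hmem
        rcases List.mem_cons.mp hmem with h | h
        · exact hyc h.symm
        · exact absurd (hall cur h) (not_le_of_gt hcy)
      rw [ofList_cons, hcount0]
      simp only [List.filter_cons]
      rw [if_pos (by simpa using (fun h => hyc h : ¬ y = cur))]
      have hfilter : ((PySem.Set.ofList ys).filter (fun z => !(z == y))).filter (fun z => !(z == cur))
          = (PySem.Set.ofList ys).filter (fun z => !(z == y)) := by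
        refine List.filter_eq_self.mpr (fun z hz => ?_)
        rcases List.mem_filter.mp hz with ⟨h1, _⟩
        have : y ≤ z := hall z ((PySem.Set.mem_ofList ys z).mp h1)
        have : cur < z := lt_of_lt_of_le hcy this
        simpa using ne_of_gt this
      rw [List.filter_filter] at hfilter ⊢
      rw [hfilter]
      simp only [Nat.cast_zero, add_zero, List.map_cons, List.count_cons_self, List.append_assoc,
        List.singleton_append]
      congr 3
      · congr 1; push_cast; ring
      refine List.map_congr_left (fun k hk => ?_)
      have hk2 : ¬ y = k := by
        rcases List.mem_filter.mp hk with ⟨_, h2⟩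
        have h3 : ¬ k = y := by simpa using h2
        exact fun h => h3 h.symm
      rw [List.count_cons]
      simp [hk2]

lemma groups_eq_sorted_counter (elems : List String) :
    pvGroupCounts (PySem.List.sorted elems (fun x => x))
      = PySem.List.sorted2 (PySem.Dict.counter elems).items Prod.fst Prod.snd := by
  rw [PySem.Dict.items_counter]
  rw [sorted2_eq_sorted_fst _ _ _ (by
    intro a ha b hb hab
    rcases List.mem_map.mp ha with ⟨k1, _, rfl⟩
    rcases List.mem_map.mp hb with ⟨k2, _, rfl⟩
    simp only at hab
    simp [hab])]
  have hD : PySem.List.sorted (List.map (fun k => (k, (List.count k elems : Int))) (PySem.Set.ofList elems)) Prod.fst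
      = (PySem.List.sorted (PySem.Set.ofList elems) (fun x => x)).map (fun k => (k, (List.count k elems : Int))) := by
    apply PySem.List.sorted_eq_of_perm_of_pairwise_lt
    · exact (PySem.List.sorted_perm (PySem.Set.ofList elems) (fun x => x) false).map _
    · exact List.pairwise_map.mpr ((PySem.List.sorted_ofList_pairwise_lt elems).imp (fun h => h))
  rw [hD]
  have hpair : (PySem.List.sorted elems (fun x => x)).Pairwise (· ≤ ·) :=
    PySem.List.sorted_pairwise elems (fun x => x)
  rcases hl : PySem.List.sorted elems (fun x => x) with _ | ⟨x, rest⟩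
  · have : elems = [] := (PySem.List.sorted_eq_nil_iff elems (fun x => x) false).mp hl
    subst this
    rfl
  · rw [hl] at hpair
    have hperm : (PySem.List.sorted elems (fun x => x)).Perm elems :=
      PySem.List.sorted_perm elems (fun x => x) false
    rw [hl] at hperm
    have hcount : ∀ k, List.count k elems = List.count k (x :: rest) := fun k =>
      (hperm.count_eq k).symm
    have hrest : ∀ z ∈ rest, x ≤ z := fun z hz => List.rel_of_pairwise_cons hpair hz
    -- the sorted distinct elements are x followed by the distinct later elements
    have hDs : PySem.List.sorted (PySem.Set.ofList elems) (fun x => x)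
        = x :: (PySem.Set.ofList rest).filter (fun z => !(z == x)) := by
      apply PySem.List.sorted_eq_of_perm_of_pairwise_lt
      · have hnd1 : (x :: (PySem.Set.ofList rest).filter (fun z => !(z == x))).Nodup := by
          refine List.Nodup.cons ?_ ((PySem.Set.nodup_ofList rest).filter _)
          intro hx
          rcases List.mem_filter.mp hx with ⟨_, h2⟩
          simp at h2
        refine (List.perm_ext_iff_of_nodup hnd1 (PySem.Set.nodup_ofList elems)).mpr ?_
        intro z
        constructor
        · intro hz
          rcases List.mem_cons.mp hz with rfl | hz
          · exact (PySem.Set.mem_ofList elems z).mpr (hperm.mem_iff.mp (by simp))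
          · rcases List.mem_filter.mp hz with ⟨h1, _⟩
            exact (PySem.Set.mem_ofList elems z).mpr
              (hperm.mem_iff.mp (by simp [(PySem.Set.mem_ofList rest z).mp h1]))
        · intro hz
          have hz' : z ∈ x :: rest := hperm.mem_iff.mpr ((PySem.Set.mem_ofList elems z).mp hz)
          rcases List.mem_cons.mp hz' with rfl | hz'
          · simp
          · by_cases hzx : z = x
            · simp [hzx]
            · refine List.mem_cons_of_mem _ (List.mem_filter.mpr ⟨(PySem.Set.mem_ofList rest z).mpr hz', by simpa using hzx⟩)
      · constructor
        · intro z hz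
          rcases List.mem_filter.mp hz with ⟨h1, h2⟩
          have h3 : x ≤ z := hrest z ((PySem.Set.mem_ofList rest z).mp h1)
          have h4 : ¬ z = x := by simpa using h2
          exact lt_of_le_of_ne h3 (fun h => h4 h.symm)
        · have hle : ((PySem.Set.ofList rest).filter (fun z => !(z == x))).Pairwise (· ≤ ·) :=
            hpair.tail.sublist (List.filter_sublist.trans (ofList_sublist rest))
          have hne : ((PySem.Set.ofList rest).filter (fun z => !(z == x))).Pairwise (· ≠ ·) :=
            (PySem.Set.nodup_ofList rest).filter _
          exact (hle.and hne).imp (fun h => lt_of_le_of_ne h.1 h.2)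
    rw [hDs]
    show (rest.foldl (fun s e =>
        if e == s.2.1 then (s.1, s.2.1, s.2.2 + 1)
        else (s.1 ++ [(s.2.1, s.2.2)], e, 1)) (([] : List (String × Int)), x, (1 : Int))).1 ++ _ = _
    rw [groupLoop_spec rest [] x 1 hpair.tail hrest]
    simp only [List.map_cons, List.nil_append, hcount, List.count_cons_self]
    congr 1
    · congr 1
      push_cast
      ring
    refine List.map_congr_left (fun k hk => ?_)
    have hk2 : ¬ x = k := by
      rcases List.mem_filter.mp hk with ⟨_, h2⟩
      have h3 : ¬ k = x := by simpa using h2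
      exact fun h => h3 h.symm
    rw [List.count_cons]
    simp [hk2]

-- ===== VERDICT (by name: the statement is the Claim_ definition above) =====
theorem molecule_signature_py_spec : Claim_equal_molecule_signature_py := by
  intro molecule _
  unfold Spec_molecule_signature_py molecule_signature_py molecule_signature_py_alt
  simp only []
  rw [← List.foldl_map (f := fun atom => PySem.Dict.getD (PySem.Dict.mk atom) "element" "?")
        (g := fun (d : PySem.Dict String Int) e => d.insert e (d.getD e 0 + 1))]
  rw [PySem.Dict.foldl_insert_getD_add_one_eq_counter]
  rw [← groups_eq_sorted_counter]
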